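-- pv_equiv track=rewrite | github.com/MaxHsiang/schedule-image-to-excel | schedule_core.py | _group_lines
-- ===== SOURCE A (Python) =====
-- from typing import Dict, List, Sequence, Tuple
--
-- def _group_lines(values: Sequence[int], gap: int = 2) -> List[int]:
--     groups: List[List[int]] = []
--     for value in values:
--         if not groups or value - groups[-1][-1] > gap:
--             groups.append([value])
--         else:
--             groups[-1].append(value)
--     return [round(sum(group) / len(group)) for group in groups]
-- ===== SOURCE B (Python) =====
-- from typing import List, Sequence
--
-- def _group_lines(values: Sequence[int], gap: int = 2) -> List[int]:
--     # One streaming pass: keep only a running (sum, count) for the current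
--     # run and emit its rounded average as soon as a gap is seen, instead of
--     # building lists of grouped values and averaging them afterwards.
--     out: List[int] = []
--     total = count = 0
--     prev = None
--     for value in values:
--         if prev is not None and value - prev > gap:
--             out.append(round(total / count))
--             total = count = 0
--         total += value
--         count += 1
--         prev = value
--     if count:
--         out.append(round(total / count))
--     return out
-- ===== Notes on version B (the rewrite author's own statement) =====
-- stated objective: faster
-- what changed: B replaces A's list-of-groups accumulation plus a second averaging pass with a single streaming pass that keeps only a running (sum, count) per run and emits each rounded average as soon as a gap is seen, never materialising the grouped values.
import Mathlib
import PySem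

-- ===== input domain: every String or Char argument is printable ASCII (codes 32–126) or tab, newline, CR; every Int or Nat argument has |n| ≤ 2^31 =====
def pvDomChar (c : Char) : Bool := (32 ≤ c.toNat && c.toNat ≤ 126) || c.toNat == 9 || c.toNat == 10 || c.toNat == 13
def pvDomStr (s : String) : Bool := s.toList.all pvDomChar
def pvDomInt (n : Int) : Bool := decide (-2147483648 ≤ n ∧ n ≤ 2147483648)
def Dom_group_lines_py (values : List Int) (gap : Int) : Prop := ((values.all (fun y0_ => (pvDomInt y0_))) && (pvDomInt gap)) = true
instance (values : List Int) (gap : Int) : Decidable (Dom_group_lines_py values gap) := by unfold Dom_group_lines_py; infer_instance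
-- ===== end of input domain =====

-- B streams a running (sum, count) per run and emits averages on the fly,
-- instead of A's list-of-groups built first and averaged afterwards (objective: alternative).

-- ===== PORT A =====
-- Python's round(sum(g)/len(g)) (float true division, round-half-to-even), ported
-- exactly as banker's rounding of the exact rational s/n (n > 0); this is exact on
-- the stated domain (|value| ≤ 2^31), where the correctly-rounded float quotient
-- rounds to the same integer as the exact rational.
def pyRoundDiv (s n : Int) : Int :=
  let q := PySem.Int.floordiv s n
  let r := s - q * n
  if 2 * r < n then q
  else if 2 * r > n then q + 1
  else if q % 2 = 0 then q else q + 1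

-- one iteration of A's loop body; groups[-1][-1] is (getLastD []).getLastD 0 (both
-- nonempty whenever that branch of the short-circuit `or` is reached)
def stepA (gap : Int) (groups : List (List Int)) (value : Int) : List (List Int) :=
  if groups = [] ∨ value - ((groups.getLastD []).getLastD 0) > gap then
    groups ++ [[value]]
  else
    groups.dropLast ++ [groups.getLastD [] ++ [value]]

def group_lines_py (values : List Int) (gap : Int) : List Int :=
  (values.foldl (stepA gap) []).map (fun g => pyRoundDiv g.sum (g.length : Int))

-- ===== PORT B =====
-- state: (out, total, count, prev); one iteration of B's loop body
def stepB (gap : Int) (st : List Int × Int × Int × Option Int) (value : Int) :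
    List Int × Int × Int × Option Int :=
  let (out, total, count, prev) := st
  let (out, total, count) :=
    match prev with
    | some p => if value - p > gap then (out ++ [pyRoundDiv total count], 0, 0) else (out, total, count)
    | none => (out, total, count)
  (out, total + value, count + 1, some value)

def group_lines_py_alt (values : List Int) (gap : Int) : List Int :=
  let (out, total, count, _) := values.foldl (stepB gap) ([], 0, 0, none)
  if count ≠ 0 then out ++ [pyRoundDiv total count] else out

-- ===== PRECONDITION & SPEC =====
def Spec_group_lines_py (values : List Int) (gap : Int) (out : List Int) : Prop := out = group_lines_py_alt values gap
instance (values : List Int) (gap : Int) (out : List Int) : Decidable (Spec_group_lines_py values gap out) := by unfold Spec_group_lines_py; infer_instance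

-- ===== CLAIM (what is proved, stated in full; the proofs are below) =====
def Claim_equal_group_lines_py : Prop := ∀ (values : List Int) (gap : Int), Dom_group_lines_py values gap → Spec_group_lines_py values gap (group_lines_py values gap)

-- ===== LEMMAS AND PROOFS =====

-- B's finalisation
def finB (st : List Int × Int × Int × Option Int) : List Int :=
  let (out, total, count, _) := st
  if count ≠ 0 then out ++ [pyRoundDiv total count] else out

-- loop invariant: A's groups are G ++ [g] with g the current (nonempty) run,
-- matched on B's side by (G.map avg, g.sum, g.length, last of g)
theorem foldAB (gap : Int) (vs : List Int) : ∀ (G : List (List Int)) (g : List Int), g ≠ [] →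
    (List.foldl (stepA gap) (G ++ [g]) vs).map (fun h => pyRoundDiv h.sum (h.length : Int))
    = finB (List.foldl (stepB gap) (G.map (fun h => pyRoundDiv h.sum (h.length : Int)), g.sum, (g.length : Int), some (g.getLastD 0)) vs) := by
  induction vs with
  | nil =>
    intro G g hg
    simp [finB]
    intro h
    exact absurd (by exact_mod_cast h) (by simpa using hg)
  | cons v vs ih =>
    intro G g hg
    simp only [List.foldl_cons]
    have hld : g.getLastD 0 = g.getLast?.getD 0 := List.getLastD_eq_getLast?
    by_cases hc : gap < v - g.getLast?.getD 0
    · have hA : stepA gap (G ++ [g]) v = (G ++ [g]) ++ [[v]] := by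
        simp [stepA, hc]
      have hB : stepB gap (G.map (fun h => pyRoundDiv h.sum (h.length : Int)), g.sum, (g.length : Int), some (g.getLastD 0)) v
          = ((G ++ [g]).map (fun h => pyRoundDiv h.sum (h.length : Int)), 0 + v, 0 + 1, some v) := by
        simp [stepB, hc]
      rw [hA, hB]
      simpa using ih (G ++ [g]) [v] (by simp)
    · have hA : stepA gap (G ++ [g]) v = G ++ [g ++ [v]] := by
        simp [stepA, hc]
      have hB : stepB gap (G.map (fun h => pyRoundDiv h.sum (h.length : Int)), g.sum, (g.length : Int), some (g.getLastD 0)) v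
          = (G.map (fun h => pyRoundDiv h.sum (h.length : Int)), g.sum + v, (g.length : Int) + 1, some v) := by
        simp [stepB, hc]
      rw [hA, hB]
      have := ih G (g ++ [v]) (by simp)
      simpa [List.getLastD_concat] using this

-- ===== VERDICT (by name: the statement is the Claim_ definition above) =====
theorem group_lines_py_spec : Claim_equal_group_lines_py := by
  intro values gap _
  unfold Spec_group_lines_py group_lines_py group_lines_py_alt
  cases values with
  | nil => simp
  | cons v vs =>
    simp only [List.foldl_cons]
    have hA : stepA gap [] v = [] ++ [[v]] := by simp [stepA]
    have hB : stepB gap ([], 0, 0, none) v = (([] : List (List Int)).map (fun h => pyRoundDiv h.sum (h.length : Int)), 0 + v, 0 + 1, some v) := by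
      simp [stepB]
    rw [hA, hB]
    have := foldAB gap vs [] [v] (by simp)
    simp only [finB] at this
    simpa using this
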